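-- pv_equiv track=rewrite | github.com/iq-company/idflow | idflow/tasks/create_blog_post_draft/create_blog_post_draft.py | _generate_title
-- ===== SOURCE A (Python) =====
-- from typing import Dict, Any
--
-- def _generate_title(research_data: Dict[str, Any]) -> str:
--     """Generate an engaging blog post title based on research."""
--     # Extract key terms from research
--     gpt_research = research_data.get("gpt_researcher", {})
--     key_terms = []
--
--     for result in gpt_research.get("results", []):
--         title = result.get("title", "")
--         if "MLLM" in title and "OCR" in title:
--             return "MLLM vs. OCR: A Comprehensive Comparison of Modern AI Technologies"
--         elif "MLLM" in title:
--             key_terms.append("MLLM")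
--         elif "OCR" in title:
--             key_terms.append("OCR")
--
--     if key_terms:
--         return f"{' vs. '.join(key_terms)}: A Complete Guide"
--
--     return "AI Technology Comparison: Understanding Modern Solutions"
-- ===== SOURCE B (Python) =====
-- def _generate_title(research_data):
--     """Generate an engaging blog post title based on research."""
--     gpt_research = research_data.get("gpt_researcher", {})
--     titles = [r.get("title", "") for r in gpt_research.get("results", [])]
--     if any("MLLM" in t and "OCR" in t for t in titles):
--         return "MLLM vs. OCR: A Comprehensive Comparison of Modern AI Technologies"
--     key_terms = ["MLLM" if "MLLM" in t else "OCR"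
--                  for t in titles if "MLLM" in t or "OCR" in t]
--     if key_terms:
--         return f"{' vs. '.join(key_terms)}: A Complete Guide"
--     return "AI Technology Comparison: Understanding Modern Solutions"
-- ===== Notes on version B (the rewrite author's own statement) =====
-- stated objective: simpler
-- what changed: Replaces the fused early-exit loop with mutable accumulator by a declarative pipeline: materialize the titles, one any() existence check for the early-return case, then a single comprehension building key_terms.
import Mathlib
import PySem

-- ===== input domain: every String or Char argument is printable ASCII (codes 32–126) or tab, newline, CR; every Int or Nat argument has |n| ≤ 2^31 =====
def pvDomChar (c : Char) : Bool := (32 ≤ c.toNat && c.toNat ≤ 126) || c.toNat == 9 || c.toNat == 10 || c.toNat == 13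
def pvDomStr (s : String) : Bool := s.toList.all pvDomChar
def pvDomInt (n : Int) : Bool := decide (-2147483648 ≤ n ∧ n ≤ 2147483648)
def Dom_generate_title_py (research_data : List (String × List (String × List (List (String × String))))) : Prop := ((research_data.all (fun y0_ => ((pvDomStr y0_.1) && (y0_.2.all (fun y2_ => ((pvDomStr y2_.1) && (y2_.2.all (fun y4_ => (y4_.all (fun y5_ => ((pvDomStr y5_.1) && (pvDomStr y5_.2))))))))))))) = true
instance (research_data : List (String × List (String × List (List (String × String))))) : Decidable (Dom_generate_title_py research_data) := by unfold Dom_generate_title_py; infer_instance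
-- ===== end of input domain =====

-- B replaces A's fused early-exit loop with a titles list, an any() existence check
-- and one comprehension building key_terms (objective: simpler decomposition).

-- ===== PORT A =====
-- the for-loop of A: early return on "MLLM" ∧ "OCR", otherwise accumulate key_terms
def pvALoop (results : List (List (String × String))) (key_terms : List String) : String :=
  match results with
  | [] =>
      if key_terms.isEmpty then
        "AI Technology Comparison: Understanding Modern Solutions"
      else
        PySem.Str.join " vs. " key_terms ++ ": A Complete Guide"
  | r :: rest =>
      let title := (PySem.Dict.mk r).getD "title" ""
      if PySem.Str.isIn "MLLM" title && PySem.Str.isIn "OCR" title then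
        "MLLM vs. OCR: A Comprehensive Comparison of Modern AI Technologies"
      else if PySem.Str.isIn "MLLM" title then
        pvALoop rest (key_terms ++ ["MLLM"])
      else if PySem.Str.isIn "OCR" title then
        pvALoop rest (key_terms ++ ["OCR"])
      else
        pvALoop rest key_terms

def generate_title_py (research_data : List (String × List (String × List (List (String × String))))) : String :=
  let gpt_research := (PySem.Dict.mk research_data).getD "gpt_researcher" []
  pvALoop ((PySem.Dict.mk gpt_research).getD "results" []) []

-- ===== PORT B =====
def generate_title_py_alt (research_data : List (String × List (String × List (List (String × String))))) : String :=
  let gpt_research := (PySem.Dict.mk research_data).getD "gpt_researcher" []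
  let titles := ((PySem.Dict.mk gpt_research).getD "results" []).map
    (fun r => (PySem.Dict.mk r).getD "title" "")
  if titles.any (fun t => PySem.Str.isIn "MLLM" t && PySem.Str.isIn "OCR" t) then
    "MLLM vs. OCR: A Comprehensive Comparison of Modern AI Technologies"
  else
    let key_terms := (titles.filter
        (fun t => PySem.Str.isIn "MLLM" t || PySem.Str.isIn "OCR" t)).map
      (fun t => if PySem.Str.isIn "MLLM" t then "MLLM" else "OCR")
    if key_terms.isEmpty then
      "AI Technology Comparison: Understanding Modern Solutions"
    else
      PySem.Str.join " vs. " key_terms ++ ": A Complete Guide"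

-- ===== PRECONDITION & SPEC =====
def Spec_generate_title_py (research_data : List (String × List (String × List (List (String × String))))) (out : String) : Prop := out = generate_title_py_alt research_data
instance (research_data : List (String × List (String × List (List (String × String))))) (out : String) : Decidable (Spec_generate_title_py research_data out) := by unfold Spec_generate_title_py; infer_instance

-- ===== CLAIM (what is proved, stated in full; the proofs are below) =====
def Claim_equal_generate_title_py : Prop := ∀ (research_data : List (String × List (String × List (List (String × String))))), Dom_generate_title_py research_data → Spec_generate_title_py research_data (generate_title_py research_data)

-- ===== LEMMAS AND PROOFS =====

-- A's loop, related to B's titles-based pipeline, for any accumulator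
theorem pvALoop_eq (results : List (List (String × String))) (acc : List String) :
    pvALoop results acc =
      (let titles := results.map (fun r => (PySem.Dict.mk r).getD "title" "")
       if titles.any (fun t => PySem.Str.isIn "MLLM" t && PySem.Str.isIn "OCR" t) then
         "MLLM vs. OCR: A Comprehensive Comparison of Modern AI Technologies"
       else
         let key_terms := acc ++ (titles.filter
             (fun t => PySem.Str.isIn "MLLM" t || PySem.Str.isIn "OCR" t)).map
           (fun t => if PySem.Str.isIn "MLLM" t then "MLLM" else "OCR")
         if key_terms.isEmpty then
           "AI Technology Comparison: Understanding Modern Solutions"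
         else
           PySem.Str.join " vs. " key_terms ++ ": A Complete Guide") := by
  induction results generalizing acc with
  | nil =>
      simp only [pvALoop, List.map_nil, List.any_nil, List.filter_nil, List.append_nil,
        Bool.false_eq_true, reduceIte]
  | cons r rest ih =>
      simp only [pvALoop, List.map_cons, List.any_cons, List.filter_cons]
      by_cases hM : PySem.Str.isIn "MLLM" ((PySem.Dict.mk r).getD "title" "") = true <;>
        by_cases hO : PySem.Str.isIn "OCR" ((PySem.Dict.mk r).getD "title" "") = true <;>
        [skip; rw [Bool.not_eq_true] at hO; rw [Bool.not_eq_true] at hM;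
          rw [Bool.not_eq_true] at hM hO] <;>
        simp only [hM, hO, Bool.true_and, Bool.false_and, Bool.true_or, Bool.false_or,
          Bool.false_eq_true, reduceIte, ih, List.map_cons, List.append_assoc,
          List.singleton_append]

-- ===== VERDICT (by name: the statement is the Claim_ definition above) =====
theorem generate_title_py_spec : Claim_equal_generate_title_py := by
  intro rd _
  unfold Spec_generate_title_py generate_title_py generate_title_py_alt
  rw [pvALoop_eq]
  simp only [List.nil_append]
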